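-- pv_equiv track=rewrite | github.com/lore-2001/AED1-IP | guia7.py | filas_ordenadas
-- ===== SOURCE A (Python) =====
-- def ordenados (s:list[int]) -> bool:
--     res = True
--     for i in range (0,len(s)-1,1):
--         if not s[i] <s[i+1]:
--             res = False
--     return res
--
-- def filas_ordenadas(m:list[list[int]]) -> list[bool]:
--     res : list[bool] = []
--     for fila in m:
--         if ordenados (fila):
--             res.append(True)
--         else:
--             res.append(False)
--     return res
-- ===== SOURCE B (Python) =====
-- def filas_ordenadas(m: list[list[int]]) -> list[bool]:
--     # A row is strictly increasing iff it equals the sorted list of its distinct elements.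
--     return [sorted(set(fila)) == fila for fila in m]
-- ===== Notes on version B (the rewrite author's own statement) =====
-- stated objective: simpler
-- what changed: Each row is judged by comparing it with the sorted list of its distinct elements (sorted(set(row)) == row) instead of scanning adjacent index pairs with a mutable flag.
import Mathlib
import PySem

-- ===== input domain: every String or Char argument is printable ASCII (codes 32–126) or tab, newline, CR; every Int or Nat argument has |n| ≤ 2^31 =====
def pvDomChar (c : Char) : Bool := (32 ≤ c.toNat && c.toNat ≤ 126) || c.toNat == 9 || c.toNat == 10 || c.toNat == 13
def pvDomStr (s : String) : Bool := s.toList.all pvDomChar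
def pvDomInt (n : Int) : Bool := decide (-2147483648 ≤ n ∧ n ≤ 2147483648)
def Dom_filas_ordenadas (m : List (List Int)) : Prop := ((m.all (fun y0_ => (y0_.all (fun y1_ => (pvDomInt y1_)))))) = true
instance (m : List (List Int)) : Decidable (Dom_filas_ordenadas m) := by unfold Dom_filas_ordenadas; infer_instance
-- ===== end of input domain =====

-- B checks each row by 'sorted(set(row)) == row' instead of A's adjacent-pair index scan; objective: simpler.

-- ===== PORT A =====
-- helper 'ordenados' of A: flag loop over adjacent index pairs
def ordenados (s : List Int) : Bool :=
  (PySem.List.pyRange 0 ((s.length : Int) - 1) 1).foldl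
    (fun res i =>
      if ¬ (PySem.List.pyGetD s i 0 < PySem.List.pyGetD s (i + 1) 0) then false else res)
    true

def filas_ordenadas (m : List (List Int)) : List Bool :=
  m.foldl (fun res fila => if ordenados fila then res ++ [true] else res ++ [false]) []

-- ===== PORT B =====
def filas_ordenadas_alt (m : List (List Int)) : List Bool :=
  m.map (fun fila => PySem.List.sorted (PySem.Set.ofList fila) (fun x => x) false == fila)

-- ===== PRECONDITION & SPEC =====
def Spec_filas_ordenadas (m : List (List Int)) (out : List Bool) : Prop := out = filas_ordenadas_alt m
instance (m : List (List Int)) (out : List Bool) : Decidable (Spec_filas_ordenadas m out) := by unfold Spec_filas_ordenadas; infer_instance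

-- ===== CLAIM (what is proved, stated in full; the proofs are below) =====
def Claim_equal_filas_ordenadas : Prop := ∀ (m : List (List Int)), Dom_filas_ordenadas m → Spec_filas_ordenadas m (filas_ordenadas m)

-- ===== LEMMAS AND PROOFS =====

-- A's flag loop is an 'all' over the visited indices
theorem foldl_flag (c : Int → Prop) [DecidablePred c] (l : List Int) (b : Bool) :
    l.foldl (fun res i => if ¬ c i then false else res) b
      = (b && l.all (fun i => decide (c i))) := by
  induction l generalizing b with
  | nil => simp
  | cons x xs ih =>
    simp only [List.foldl_cons, List.all_cons, ih]
    by_cases h : c x <;> simp [h]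

-- A's helper decides strict increase of the row
theorem ordenados_eq (s : List Int) :
    ordenados s = decide (List.Pairwise (· < ·) s) := by
  unfold ordenados
  rw [foldl_flag]
  simp only [Bool.true_and]
  rcases Decidable.em (List.Pairwise (· < ·) s) with hp | hp
  · simp only [hp, decide_true]
    rw [List.all_eq_true]
    intro i hi
    rw [PySem.List.mem_pyRange_one] at hi
    obtain ⟨h0, h1⟩ := hi
    obtain ⟨k, rfl⟩ := Int.eq_ofNat_of_zero_le h0
    have hk1 : (k : Int) + 1 = ((k + 1 : Nat) : Int) := by push_cast; ring
    have hlen : k + 1 < s.length := by omega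
    rw [hk1, PySem.List.pyGetD_natCast, PySem.List.pyGetD_natCast]
    have := (List.isChain_iff_pairwise.mpr hp)
    have := List.isChain_iff_getElem.mp this k hlen
    simp [hlen, Nat.lt_of_succ_lt hlen, this]
  · simp only [hp, decide_false]
    rw [← List.isChain_iff_pairwise, List.isChain_iff_getElem] at hp
    push Not at hp
    obtain ⟨k, hk, hlt⟩ := hp
    rw [List.all_eq_false]
    refine ⟨(k : Int), ?_, ?_⟩
    · rw [PySem.List.mem_pyRange_one]; omega
    · have hk1 : (k : Int) + 1 = ((k + 1 : Nat) : Int) := by push_cast; ring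
      rw [hk1, PySem.List.pyGetD_natCast, PySem.List.pyGetD_natCast]
      simp [hk, Nat.lt_of_succ_lt hk, hlt]

-- B's row test decides the same proposition
theorem alt_row_eq (s : List Int) :
    (PySem.List.sorted (PySem.Set.ofList s) (fun x => x) false == s)
      = decide (List.Pairwise (· < ·) s) := by
  rcases Decidable.em (List.Pairwise (· < ·) s) with hp | hp
  · have hnd : s.Nodup := hp.imp (fun h => ne_of_lt h)
    have hself : PySem.Set.ofList s = s := PySem.Set.ofList_eq_self_of_nodup s hnd
    have : PySem.List.sorted (PySem.Set.ofList s) (fun x => x) false = s := by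
      refine PySem.List.sorted_eq_of_perm_of_pairwise_lt _ _ _ ?_ ?_
      · rw [hself]
      · exact hp
    simp [this, hp]
  · have : ¬ PySem.List.sorted (PySem.Set.ofList s) (fun x => x) false = s := by
      intro h
      exact hp (by simpa using h ▸ PySem.List.sorted_ofList_pairwise_lt (xs := s))
    simp [this, hp]

-- ===== VERDICT (by name: the statement is the Claim_ definition above) =====
theorem filas_ordenadas_spec : Claim_equal_filas_ordenadas := by
  intro m _
  unfold Spec_filas_ordenadas filas_ordenadas filas_ordenadas_alt
  have hstep : ∀ (res : List Bool) (fila : List Int),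
      (if ordenados fila then res ++ [true] else res ++ [false]) = res ++ [ordenados fila] := by
    intro res fila; by_cases h : ordenados fila <;> simp [h]
  calc m.foldl (fun res fila => if ordenados fila then res ++ [true] else res ++ [false]) []
      = m.foldl (fun res fila => res ++ [ordenados fila]) [] := by
        exact PySem.List.foldl_congr_mem m _ _ [] (fun res fila _ => hstep res fila)
    _ = m.map ordenados := by simpa using PySem.List.foldl_append_singleton_eq_map ordenados m []
    _ = m.map (fun fila => PySem.List.sorted (PySem.Set.ofList fila) (fun x => x) false == fila) := by
        apply List.map_congr_left
        intro fila _
        rw [ordenados_eq, alt_row_eq]
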